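-- pv_equiv track=rewrite | github.com/SETI/rms-data-projects | metadata/hosts/GO_0xxx/index_config.py | _sclk_format_count
-- ===== SOURCE A (Python) =====
-- def _sclk_format_count(fields, format):
--
--     # Get delimiters
--     delims = [c for c in format if not c.isalnum()] + ['']
--
--     # Get field formats (i.e. field widths)
--     f = "".join([s if s.isalnum() else '/' for s in format])
--     formats = f.split('/')
--     widths = [len(f) for f in formats]
--
--     # Build count string
--     count = ''
--     for delim, width, field in zip(delims, widths, fields):
--         s = f'{field}'
--         count += '0'*(width-len(s)) + s + delim
--
--     return count
-- ===== SOURCE B (Python) =====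
-- def _sclk_format_count(fields, format):
--     # Single left-to-right pass: track the current alnum-run width and the
--     # field index; emit each padded field at every delimiter and at the end.
--     count = ''
--     i = 0
--     width = 0
--     for c in format:
--         if c.isalnum():
--             width += 1
--         else:
--             if i < len(fields):
--                 s = f'{fields[i]}'
--                 count += '0'*(width - len(s)) + s + c
--             i += 1
--             width = 0
--     if i < len(fields):
--         s = f'{fields[i]}'
--         count += '0'*(width - len(s)) + s
--     return count
-- ===== Notes on version B (the rewrite author's own statement) =====
-- stated objective: alternative
-- what changed: Replaces A's precompute-then-zip pipeline (build delimiter list, rewrite format, split it, compute widths, then fold over a 3-way zip) with a single left-to-right pass over the format characters maintaining a running alnum-run width and a field index.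
import Mathlib
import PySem

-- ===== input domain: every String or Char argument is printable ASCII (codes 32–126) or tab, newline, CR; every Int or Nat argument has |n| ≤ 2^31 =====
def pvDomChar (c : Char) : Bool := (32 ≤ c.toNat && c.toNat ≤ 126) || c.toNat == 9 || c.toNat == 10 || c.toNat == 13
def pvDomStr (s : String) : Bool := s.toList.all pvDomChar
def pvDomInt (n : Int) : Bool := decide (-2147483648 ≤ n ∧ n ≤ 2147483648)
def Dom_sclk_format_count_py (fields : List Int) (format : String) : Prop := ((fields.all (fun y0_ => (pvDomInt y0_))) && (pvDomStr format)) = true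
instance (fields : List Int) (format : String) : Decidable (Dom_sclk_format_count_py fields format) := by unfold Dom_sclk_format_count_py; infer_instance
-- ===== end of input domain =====

-- B replaces A's precompute-then-zip pipeline with a single left-to-right pass
-- over the format characters (same cost; a different decomposition).


-- ===== PORT A =====
-- literal transliteration of A: build delims, rewrite format, split on '/',
-- take widths, then fold over the zip of delims/widths/fields
def sclk_format_count_py (fields : List Int) (format : String) : String :=
  let cs := format.toList
  let delims := (cs.filter (fun c => !PySem.Chars.isalnum c)).map (fun c => [c]) ++ [([] : List Char)]
  let f := cs.map (fun c => if PySem.Chars.isalnum c then c else '/')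
  let formats := PySem.Chars.splitOn f ['/']
  let widths := formats.map List.length
  let count := ((delims.zip widths).zip fields).foldl
    (fun acc x =>
      acc ++ (List.replicate (x.1.2 - (PySem.Int.toChars x.2).length) '0'
              ++ PySem.Int.toChars x.2 ++ x.1.1)) []
  String.ofList count

-- ===== PORT B =====
-- '0'*(width-len(s)) + s
def pvPad (width : Nat) (f : Int) : List Char :=
  List.replicate (width - (PySem.Int.toChars f).length) '0' ++ PySem.Int.toChars f

-- the single pass of Source B: i = field index, width = current alnum-run width
def pvBGo (fields : List Int) : List Char → Nat → Nat → List Char → List Char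
  | [], i, width, acc =>
      if i < fields.length then acc ++ pvPad width (fields.getD i 0) else acc
  | c :: rest, i, width, acc =>
      if PySem.Chars.isalnum c then pvBGo fields rest i (width + 1) acc
      else pvBGo fields rest (i + 1) 0
        (if i < fields.length then acc ++ pvPad width (fields.getD i 0) ++ [c] else acc)

def sclk_format_count_py_alt (fields : List Int) (format : String) : String :=
  String.ofList (pvBGo fields format.toList 0 0 [])

-- ===== PRECONDITION & SPEC =====
def Spec_sclk_format_count_py (fields : List Int) (format : String) (out : String) : Prop := out = sclk_format_count_py_alt fields format
instance (fields : List Int) (format : String) (out : String) : Decidable (Spec_sclk_format_count_py fields format out) := by unfold Spec_sclk_format_count_py; infer_instance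

-- ===== CLAIM (what is proved, stated in full; the proofs are below) =====
def Claim_equal_sclk_format_count_py : Prop := ∀ (fields : List Int) (format : String), Dom_sclk_format_count_py fields format → Spec_sclk_format_count_py fields format (sclk_format_count_py fields format)

-- ===== LEMMAS AND PROOFS =====

-- structural version of A's split('/')
def pvSplit : List Char → List (List Char)
  | [] => [[]]
  | c :: rest =>
    if c = '/' then [] :: pvSplit rest
    else
      match pvSplit rest with
      | [] => []
      | h :: t => (c :: h) :: t

-- the (delimiter, width) pairs A's zip pairs up, computed structurally
def pvPairs : List Char → List (List Char × Nat)
  | [] => [([], 0)]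
  | c :: rest =>
    if PySem.Chars.isalnum c then
      match pvPairs rest with
      | [] => []
      | (d, w) :: t => (d, w + 1) :: t
    else ([c], 0) :: pvPairs rest

def pvBump (width : Nat) : List (List Char × Nat) → List (List Char × Nat)
  | [] => []
  | (d, w) :: t => (d, w + width) :: t

def pvG (x : (List Char × Nat) × Int) : List Char :=
  List.replicate (x.1.2 - (PySem.Int.toChars x.2).length) '0' ++ PySem.Int.toChars x.2 ++ x.1.1

theorem pvSplit_ne_nil (l : List Char) : pvSplit l ≠ [] := by
  induction l with
  | nil => simp [pvSplit]
  | cons c rest ih =>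
    simp only [pvSplit]
    split_ifs
    · simp
    · cases h : pvSplit rest with
      | nil => exact absurd h ih
      | cons a t => simp

theorem pvPairs_ne_nil (l : List Char) : pvPairs l ≠ [] := by
  induction l with
  | nil => simp [pvPairs]
  | cons c rest ih =>
    simp only [pvPairs]
    split_ifs
    · cases h : pvPairs rest with
      | nil => exact absurd h ih
      | cons a t => cases a; simp
    · simp

theorem pvGo_spec : ∀ (fuel : Nat) (l cur : List Char) (acc : List (List Char)),
    l.length < fuel →
    PySem.Chars.splitOn.go ['/'] fuel l cur acc
      = acc.reverse ++ (pvSplit l).modifyHead (cur.reverse ++ ·) := by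
  intro fuel
  induction fuel with
  | zero => intro l cur acc h; omega
  | succ n ih =>
    intro l cur acc h
    cases l with
    | nil => simp [PySem.Chars.splitOn.go, pvSplit, List.modifyHead]
    | cons c rest =>
      simp only [PySem.Chars.splitOn.go, List.isPrefixOf]
      by_cases hc : c = '/'
      · subst hc
        rw [if_pos (by simp)]
        rw [show List.drop (['/'] : List Char).length ('/' :: rest) = rest from rfl]
        rw [ih rest [] (cur.reverse :: acc) (by simp only [List.length_cons] at h; omega)]
        simp only [pvSplit]
        cases pvSplit rest <;> simp [List.modifyHead]
      · rw [if_neg (by simp only [Bool.and_true, beq_iff_eq]; exact Ne.symm hc)]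
        rw [ih rest (c :: cur) acc (by simp only [List.length_cons] at h; omega)]
        simp only [pvSplit, if_neg hc]
        cases h2 : pvSplit rest with
        | nil => exact absurd h2 (pvSplit_ne_nil rest)
        | cons a t => simp [List.modifyHead]

theorem splitOn_eq_pvSplit (l : List Char) :
    PySem.Chars.splitOn l ['/'] = pvSplit l := by
  rw [PySem.Chars.splitOn, pvGo_spec (l.length + 1) l [] [] (by omega)]
  cases h : pvSplit l with
  | nil => exact absurd h (pvSplit_ne_nil l)
  | cons a t => simp [List.modifyHead]

theorem pvPairs_eq (cs : List Char) :
    ((cs.filter (fun c => !PySem.Chars.isalnum c)).map (fun c => [c]) ++ [([] : List Char)]).zip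
      ((pvSplit (cs.map (fun c => if PySem.Chars.isalnum c then c else '/'))).map List.length)
    = pvPairs cs := by
  induction cs with
  | nil => simp [pvSplit, pvPairs]
  | cons c rest ih =>
    by_cases hc : PySem.Chars.isalnum c = true
    · have hne : c ≠ '/' := by
        intro h; subst h; exact absurd hc (by decide)
      cases h2 : pvSplit (rest.map (fun c => if PySem.Chars.isalnum c then c else '/')) with
      | nil => exact absurd h2 (pvSplit_ne_nil _)
      | cons hseg t =>
        cases hD : (rest.filter (fun c => !PySem.Chars.isalnum c)).map (fun c => [c]) ++ [([] : List Char)] with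
        | nil => simp at hD
        | cons d ds =>
          have ihc : pvPairs rest = (d, hseg.length) :: ds.zip (t.map List.length) := by
            rw [← ih, h2, hD]; simp
          simp [pvSplit, pvPairs, hc, hne, h2, hD, ihc]
    · simp [pvSplit, pvPairs, hc, ih]

theorem pvBump_zero (ps : List (List Char × Nat)) : pvBump 0 ps = ps := by
  cases ps with
  | nil => rfl
  | cons a t => cases a; simp [pvBump]

theorem pvBGo_spec (fields : List Int) :
    ∀ (cs : List Char) (i width : Nat) (acc : List Char),
    pvBGo fields cs i width acc
      = acc ++ List.flatMap pvG ((pvBump width (pvPairs cs)).zip (fields.drop i)) := by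
  intro cs
  induction cs with
  | nil =>
    intro i width acc
    simp only [pvBGo, pvPairs, pvBump, Nat.zero_add]
    cases h : fields.drop i with
    | nil =>
      have : fields.length ≤ i := List.drop_eq_nil_iff.mp h
      simp [Nat.not_lt.mpr this]
    | cons f fs =>
      have hh : fields[i]? = some f := by
        rw [← List.head?_drop, h, List.head?_cons]
      have hlt : i < fields.length := by
        have := List.getElem?_eq_some_iff.mp hh
        exact this.1
      have hge : fields[i] = f := by
        obtain ⟨_, hg⟩ := List.getElem?_eq_some_iff.mp hh
        exact hg
      have hgd : fields.getD i 0 = f := by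
        rw [List.getD_eq_getElem?_getD, hh]; rfl
      simp [hlt, hge, pvG, pvPad]
  | cons c rest ih =>
    intro i width acc
    by_cases hc : PySem.Chars.isalnum c = true
    · simp only [pvBGo, if_pos hc, pvPairs]
      rw [ih]
      cases h2 : pvPairs rest with
      | nil => exact absurd h2 (pvPairs_ne_nil rest)
      | cons p t =>
        cases p with
        | mk d w =>
          simp only [pvBump]
          have : w + (width + 1) = w + 1 + width := by omega
          rw [this]
    · simp only [pvBGo, if_neg hc, pvPairs, pvBump]
      rw [ih]
      cases h : fields.drop i with
      | nil =>
        have hle : fields.length ≤ i := List.drop_eq_nil_iff.mp h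
        have h1 : fields.drop (i + 1) = [] := List.drop_eq_nil_iff.mpr (by omega)
        simp [Nat.not_lt.mpr hle, h1]
      | cons f fs =>
        have hh : fields[i]? = some f := by
          rw [← List.head?_drop, h, List.head?_cons]
        have hlt : i < fields.length := (List.getElem?_eq_some_iff.mp hh).1
        have hge : fields[i] = f := by
          obtain ⟨_, hg⟩ := List.getElem?_eq_some_iff.mp hh
          exact hg
        have hgd : fields.getD i 0 = f := by
          rw [List.getD_eq_getElem?_getD, hh]; rfl
        have h1 : fields.drop (i + 1) = fs := by
          rw [← List.tail_drop, h, List.tail_cons]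
        simp only [if_pos hlt, hgd, h1, pvBump_zero, List.zip_cons_cons, List.flatMap_cons]
        simp [pvG, pvPad]

-- ===== VERDICT (by name: the statement is the Claim_ definition above) =====
theorem sclk_format_count_py_spec : Claim_equal_sclk_format_count_py := by
  intro fields format _
  unfold Spec_sclk_format_count_py
  simp only [sclk_format_count_py, sclk_format_count_py_alt]
  rw [splitOn_eq_pvSplit, pvPairs_eq]
  have hfun : (fun (acc : List Char) (x : (List Char × Nat) × Int) =>
      acc ++ (List.replicate (x.1.2 - (PySem.Int.toChars x.2).length) '0'
              ++ PySem.Int.toChars x.2 ++ x.1.1))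
      = fun acc x => acc ++ pvG x := rfl
  rw [hfun, PySem.List.foldl_append_eq_flatMap pvG ((pvPairs format.toList).zip fields) [],
    pvBGo_spec fields format.toList 0 0 [], pvBump_zero, List.drop_zero]
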